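-- pv_equiv track=rewrite | github.com/vbionic/AS_MRI2Mesh | as_bin/st06_correct_shapes/as_correctShapes.py | get_angle_cw
-- ===== SOURCE A (Python) =====
-- def get_angle_cw(angleStart, angleEnd):
--     if (angleEnd < angleStart):
--         angleEnd += 360
--     temp = angleEnd - angleStart
--     while (temp>=360):
--         temp -= 360
--     while (temp<0):
--         temp += 360
--     return temp
-- ===== SOURCE B (Python) =====
-- def get_angle_cw(angleStart, angleEnd):
--     return (angleEnd - angleStart) % 360
-- ===== Notes on version B (the rewrite author's own statement) =====
-- stated objective: simpler
-- what changed: Replaced the conditional wrap and the two normalization while-loops with the single closed form (angleEnd - angleStart) % 360.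
import Mathlib
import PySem

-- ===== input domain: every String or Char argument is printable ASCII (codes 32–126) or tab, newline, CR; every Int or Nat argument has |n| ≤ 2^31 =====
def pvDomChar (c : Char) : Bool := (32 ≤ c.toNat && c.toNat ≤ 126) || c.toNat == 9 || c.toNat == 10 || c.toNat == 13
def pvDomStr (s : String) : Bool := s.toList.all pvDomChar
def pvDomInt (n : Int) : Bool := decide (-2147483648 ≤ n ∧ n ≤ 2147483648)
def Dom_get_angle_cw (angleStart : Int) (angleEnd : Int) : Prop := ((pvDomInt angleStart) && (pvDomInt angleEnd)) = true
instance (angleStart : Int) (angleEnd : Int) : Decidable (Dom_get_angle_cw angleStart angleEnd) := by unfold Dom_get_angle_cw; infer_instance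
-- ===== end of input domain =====

-- B replaces the conditional wrap and the two while-loops by the closed form (angleEnd - angleStart) % 360 (simpler).

-- ===== PORT A =====
-- while (temp >= 360): temp -= 360
def pvLoopDown (temp : Int) : Int :=
  if 360 ≤ temp then pvLoopDown (temp - 360) else temp
termination_by temp.toNat
decreasing_by omega

-- while (temp < 0): temp += 360
def pvLoopUp (temp : Int) : Int :=
  if temp < 0 then pvLoopUp (temp + 360) else temp
termination_by (-temp).toNat
decreasing_by omega

def get_angle_cw (angleStart : Int) (angleEnd : Int) : Int :=
  let angleEnd := if angleEnd < angleStart then angleEnd + 360 else angleEnd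
  let temp := angleEnd - angleStart
  pvLoopUp (pvLoopDown temp)

-- ===== PORT B =====
def get_angle_cw_alt (angleStart : Int) (angleEnd : Int) : Int :=
  PySem.Int.mod (angleEnd - angleStart) 360

-- ===== PRECONDITION & SPEC =====
def Spec_get_angle_cw (angleStart : Int) (angleEnd : Int) (out : Int) : Prop := out = get_angle_cw_alt angleStart angleEnd
instance (angleStart : Int) (angleEnd : Int) (out : Int) : Decidable (Spec_get_angle_cw angleStart angleEnd out) := by unfold Spec_get_angle_cw; infer_instance

-- ===== CLAIM (what is proved, stated in full; the proofs are below) =====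
def Claim_equal_get_angle_cw : Prop := ∀ (angleStart : Int) (angleEnd : Int), Dom_get_angle_cw angleStart angleEnd → Spec_get_angle_cw angleStart angleEnd (get_angle_cw angleStart angleEnd)

-- ===== LEMMAS AND PROOFS =====
theorem pvLoopDown_congr (t : Int) : (360 : Int) ∣ (t - pvLoopDown t) ∧ pvLoopDown t < 360 ∧ (0 ≤ t → 0 ≤ pvLoopDown t) := by
  induction t using pvLoopDown.induct with
  | case1 t h ih =>
    rw [pvLoopDown, if_pos h]
    refine ⟨?_, ih.2.1, fun _ => ih.2.2 (by omega)⟩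
    obtain ⟨k, hk⟩ := ih.1
    exact ⟨k + 1, by omega⟩
  | case2 t h =>
    rw [pvLoopDown, if_neg h]
    exact ⟨⟨0, by omega⟩, by omega, fun h => h⟩

theorem pvLoopUp_congr (t : Int) : (360 : Int) ∣ (t - pvLoopUp t) ∧ 0 ≤ pvLoopUp t ∧ (t < 360 → pvLoopUp t < 360) := by
  induction t using pvLoopUp.induct with
  | case1 t h ih =>
    rw [pvLoopUp, if_pos h]
    refine ⟨?_, ih.2.1, fun _ => ih.2.2 (by omega)⟩
    obtain ⟨k, hk⟩ := ih.1
    exact ⟨k - 1, by omega⟩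
  | case2 t h =>
    rw [pvLoopUp, if_neg h]
    exact ⟨⟨0, by omega⟩, by omega, fun h => h⟩

theorem pv_norm_eq_mod (t : Int) : pvLoopUp (pvLoopDown t) = t % 360 := by
  obtain ⟨⟨k, hk⟩, hlt, _⟩ := pvLoopDown_congr t
  obtain ⟨⟨m, hm⟩, hge, hlt'⟩ := pvLoopUp_congr (pvLoopDown t)
  have hlt2 := hlt' hlt
  omega

-- ===== VERDICT (by name: the statement is the Claim_ definition above) =====
theorem get_angle_cw_spec : Claim_equal_get_angle_cw := by
  intro s e _
  unfold Spec_get_angle_cw get_angle_cw get_angle_cw_alt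
  simp only []
  rw [pv_norm_eq_mod]
  have h360 : PySem.Int.mod (e - s) 360 = (e - s) % 360 :=
    PySem.Int.mod_eq_emod_of_pos (by omega)
  rw [h360]
  split_ifs with h
  · omega
  · rfl
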